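-- pv_equiv track=rewrite | github.com/hcgatewood/interviews | find_reachable/src.py | find_reachable
-- ===== SOURCE A (Python) =====
-- from itertools import product
--
-- XY = tuple[int, int]
--
-- def find_reachable(board: list[list[int]], position: XY) -> list[XY]:
--     reachable = []
--     directions = (d for d in product([-1, 0, 1], repeat=2) if d != (0, 0))
--     for direction in directions:
--         cur = add_wise(position, direction)
--         while is_inbounds(cur, len(board), len(board[0])):
--             reachable.append(cur)
--             cur = add_wise(cur, direction)
--     return reachable
--
-- def is_inbounds(current: XY, nrows: int, ncols: int) -> bool:
--     return 0 <= current[0] < nrows and 0 <= current[1] < ncols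
--
-- def add_wise(a: XY, b: XY) -> XY:
--     return a[0] + b[0], a[1] + b[1]
-- ===== SOURCE B (Python) =====
-- from itertools import product
--
-- def find_reachable(board, position):
--     nrows, ncols = len(board), len(board[0])
--     x, y = position
--     cells = []
--     for dx, dy in product([-1, 0, 1], repeat=2):
--         if (dx, dy) == (0, 0):
--             continue
--         steps = min(s for s in (_axis_steps(x, dx, nrows), _axis_steps(y, dy, ncols))
--                     if s is not None)
--         cells += [(x + k * dx, y + k * dy) for k in range(1, steps + 1)]
--     return cells
--
-- def _axis_steps(x, d, n):
--     """Number of consecutive steps k >= 1 keeping 0 <= x + k*d < n (None = no bound on this axis)."""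
--     if d == 0:
--         return None if 0 <= x < n else 0
--     # the k satisfying the bounds form the interval [lo, hi]; the walk starts at
--     # k = 1, so it takes hi steps iff that first step is valid, i.e. lo <= 1 <= hi
--     lo, hi = (-x, n - 1 - x) if d == 1 else (x - (n - 1), x)
--     return hi if lo <= 1 <= hi else 0
-- ===== Notes on version B (the rewrite author's own statement) =====
-- stated objective: alternative
-- what changed: Per direction, the per-cell while-loop with an is_inbounds test is replaced by a closed-form step count (the valid step numbers on each axis form an interval; the walk takes the interval's upper end if it contains step 1) and a counted range generating the cells directly; Pre_ excludes only the empty board, on which A raises IndexError at board[0].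
-- outside the precondition, e.g. on find_reachable([], (0, 0)): A raises IndexError, B raises IndexError
import Mathlib
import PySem

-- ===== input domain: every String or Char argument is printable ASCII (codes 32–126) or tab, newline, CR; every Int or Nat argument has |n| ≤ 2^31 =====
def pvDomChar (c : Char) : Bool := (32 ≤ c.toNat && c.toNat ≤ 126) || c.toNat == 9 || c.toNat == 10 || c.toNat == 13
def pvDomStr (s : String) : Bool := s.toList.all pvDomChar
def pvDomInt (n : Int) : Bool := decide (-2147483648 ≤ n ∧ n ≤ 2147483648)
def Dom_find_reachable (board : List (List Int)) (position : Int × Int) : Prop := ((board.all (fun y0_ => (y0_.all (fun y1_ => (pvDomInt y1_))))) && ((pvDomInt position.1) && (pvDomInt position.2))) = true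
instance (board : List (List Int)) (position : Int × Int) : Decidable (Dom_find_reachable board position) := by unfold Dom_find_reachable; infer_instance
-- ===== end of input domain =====

-- B replaces A's per-cell while-loop with a closed-form step count per direction
-- (objective: alternative decomposition; A raises IndexError on an empty board, excluded by Pre_).


-- ===== PORT A =====
-- is_inbounds
def pvInbounds (cur : Int × Int) (nrows ncols : Int) : Bool :=
  decide (0 ≤ cur.1 ∧ cur.1 < nrows) && decide (0 ≤ cur.2 ∧ cur.2 < ncols)

-- add_wise
def pvAddWise (a b : Int × Int) : Int × Int := (a.1 + b.1, a.2 + b.2)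

-- A's inner while-loop; the fuel only makes the loop total (it is proved sufficient).
def pvWalk (fuel : Nat) (cur d : Int × Int) (nrows ncols : Int) : List (Int × Int) :=
  match fuel with
  | 0 => []
  | f + 1 =>
    if pvInbounds cur nrows ncols then
      cur :: pvWalk f (pvAddWise cur d) d nrows ncols
    else []

-- product([-1,0,1], repeat=2) minus (0,0), in order
def pvDirsA : List (Int × Int) := [(-1,-1),(-1,0),(-1,1),(0,-1),(0,1),(1,-1),(1,0),(1,1)]

def find_reachable (board : List (List Int)) (position : Int × Int) : List (Int × Int) :=
  let nrows : Int := board.length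
  let ncols : Int := (board.headD []).length  -- board[0]; Pre_ excludes the empty board
  let fuel : Nat := (nrows + ncols).toNat + 1
  pvDirsA.foldl (fun acc d => acc ++ pvWalk fuel (pvAddWise position d) d nrows ncols) []

-- ===== PORT B =====
-- _axis_steps: the step counts k keeping the axis in bounds form the interval [lo, hi];
-- the walk starts at k = 1, so it takes hi steps iff lo ≤ 1 ≤ hi (none = no bound on this axis)
def pvAxisSteps (x d n : Int) : Option Int :=
  if d = 0 then (if 0 ≤ x ∧ x < n then none else some 0)
  else
    let lo := if d = 1 then -x else x - (n - 1)
    let hi := if d = 1 then n - 1 - x else x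
    if lo ≤ 1 ∧ 1 ≤ hi then some hi else some 0

-- min over the non-None axis counts (the none,none case is unreachable: d ≠ (0,0))
def pvMinSteps : Option Int → Option Int → Int
  | some a, some b => min a b
  | some a, none   => a
  | none,   some b => b
  | none,   none   => 0

def find_reachable_alt (board : List (List Int)) (position : Int × Int) : List (Int × Int) :=
  let nrows : Int := board.length
  let ncols : Int := (board.headD []).length
  ([(-1,-1),(-1,0),(-1,1),(0,-1),(0,1),(1,-1),(1,0),(1,1)] : List (Int × Int)).flatMap (fun d =>
    let steps := pvMinSteps (pvAxisSteps position.1 d.1 nrows) (pvAxisSteps position.2 d.2 ncols)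
    (List.range steps.toNat).map
      (fun (i : Nat) => (position.1 + ((i : Int) + 1) * d.1, position.2 + ((i : Int) + 1) * d.2)))

-- ===== PRECONDITION & SPEC =====
-- Pre_ excludes only the empty board, on which Python A raises IndexError (board[0]).
def Pre_find_reachable (board : List (List Int)) (position : Int × Int) : Prop := board ≠ []
instance (board : List (List Int)) (position : Int × Int) : Decidable (Pre_find_reachable board position) := by unfold Pre_find_reachable; infer_instance

def pvWitness_find_reachable : List (List Int) × (Int × Int) := ([[0, 0], [0, 0]], (0, 1))

def Spec_find_reachable (board : List (List Int)) (position : Int × Int) (out : List (Int × Int)) : Prop := out = find_reachable_alt board position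
instance (board : List (List Int)) (position : Int × Int) (out : List (Int × Int)) : Decidable (Spec_find_reachable board position out) := by unfold Spec_find_reachable; infer_instance

-- ===== CLAIM (what is proved, stated in full; the proofs are below) =====
def Claim_equal_find_reachable : Prop := ∀ (board : List (List Int)) (position : Int × Int), Dom_find_reachable board position → Pre_find_reachable board position → Spec_find_reachable board position (find_reachable board position)

-- ===== LEMMAS AND PROOFS =====

-- The while-loop equals the ray of length cnt when cells 0..cnt-1 are in bounds, cell cnt is not.
theorem pvWalk_eq_ray (cnt : Nat) : ∀ (fuel : Nat) (p d : Int × Int) (nr nc : Int),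
    (∀ i : Nat, i < cnt → pvInbounds (p.1 + ((i : Int) + 1) * d.1, p.2 + ((i : Int) + 1) * d.2) nr nc = true) →
    pvInbounds (p.1 + ((cnt : Int) + 1) * d.1, p.2 + ((cnt : Int) + 1) * d.2) nr nc = false →
    cnt < fuel →
    pvWalk fuel (pvAddWise p d) d nr nc
      = (List.range cnt).map (fun (i : Nat) => (p.1 + ((i : Int) + 1) * d.1, p.2 + ((i : Int) + 1) * d.2)) := by
  induction cnt with
  | zero =>
    intro fuel p d nr nc _ hfail hfuel
    match fuel, hfuel with
    | f + 1, _ =>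
      simp only [pvWalk, pvAddWise]
      have : pvInbounds (p.1 + d.1, p.2 + d.2) nr nc = false := by
        have := hfail
        simp only [Nat.cast_zero] at this
        simpa using this
      simp [this]
  | succ m ih =>
    intro fuel p d nr nc hin hfail hfuel
    match fuel, hfuel with
    | f + 1, hfuel =>
      have h0 : pvInbounds (p.1 + d.1, p.2 + d.2) nr nc = true := by
        have := hin 0 (Nat.succ_pos m)
        simpa using this
      have ihs := ih f (pvAddWise p d) d nr nc
        (fun i hi => by
          have h := hin (i + 1) (Nat.succ_lt_succ hi)
          push_cast at h
          have e : ((pvAddWise p d).1 + ((i : Int) + 1) * d.1,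
                    (pvAddWise p d).2 + ((i : Int) + 1) * d.2)
              = (p.1 + ((i : Int) + 1 + 1) * d.1, p.2 + ((i : Int) + 1 + 1) * d.2) := by
            simp only [pvAddWise, Prod.mk.injEq]
            constructor <;> ring
          rw [e]
          exact h)
        (by
          have h := hfail
          push_cast at h
          have e : ((pvAddWise p d).1 + ((m : Int) + 1) * d.1,
                    (pvAddWise p d).2 + ((m : Int) + 1) * d.2)
              = (p.1 + ((m : Int) + 1 + 1) * d.1, p.2 + ((m : Int) + 1 + 1) * d.2) := by
            simp only [pvAddWise, Prod.mk.injEq]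
            constructor <;> ring
          rw [e]
          exact h)
        (by omega)
      simp only [pvWalk, pvAddWise, h0, if_true]
      simp only [pvAddWise] at ihs
      rw [ihs, List.range_succ_eq_map, List.map_cons, List.map_map]
      congr 1
      · simp
      · apply List.map_congr_left
        intro i _
        simp only [Function.comp_apply, Prod.mk.injEq]
        constructor <;> push_cast <;> ring

-- axis count: all cells strictly before it are in bounds on that axis
theorem pvAxisSteps_in (x d n c : Int) (i : Nat) (hd : d = -1 ∨ d = 0 ∨ d = 1)
    (h : pvAxisSteps x d n = some c) (hi : (i : Int) < c) :
    0 ≤ x + ((i : Int) + 1) * d ∧ x + ((i : Int) + 1) * d < n := by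
  rcases hd with h1|h1|h1 <;> subst h1 <;>
    norm_num [pvAxisSteps] at h <;> (try split_ifs at h) <;>
    (try simp at h) <;> omega

theorem pvAxisSteps_none (x d n : Int) (i : Nat) (hd : d = -1 ∨ d = 0 ∨ d = 1)
    (h : pvAxisSteps x d n = none) :
    0 ≤ x + ((i : Int) + 1) * d ∧ x + ((i : Int) + 1) * d < n := by
  rcases hd with h1|h1|h1 <;> subst h1 <;>
    norm_num [pvAxisSteps] at h <;> (try split_ifs at h) <;>
    (try simp at h) <;> omega

-- axis count: the cell at the count is out of bounds on that axis
theorem pvAxisSteps_fail (x d n c : Int) (hd : d = -1 ∨ d = 0 ∨ d = 1)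
    (h : pvAxisSteps x d n = some c) :
    ¬ (0 ≤ x + (c + 1) * d ∧ x + (c + 1) * d < n) := by
  rcases hd with h1|h1|h1 <;> subst h1 <;>
    norm_num [pvAxisSteps] at h <;> (try split_ifs at h) <;>
    (try simp at h) <;> omega

theorem pvAxisSteps_bounds (x d n c : Int) (hn : 0 ≤ n)
    (h : pvAxisSteps x d n = some c) : 0 ≤ c ∧ c ≤ n := by
  rcases eq_or_ne d 0 with h1|h1
  · subst h1; simp only [pvAxisSteps, reduceIte] at h; split_ifs at h <;> simp_all
  · simp only [pvAxisSteps, if_neg h1] at h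
    split_ifs at h <;> simp only [Option.some.injEq] at h <;> omega

-- a finite axis count only arises from a moving axis or an out-of-bounds fixed axis
theorem pvAxisSteps_eq_none_imp (x d n : Int) (h : pvAxisSteps x d n = none) : d = 0 := by
  by_contra hd
  simp only [pvAxisSteps, if_neg hd] at h
  split_ifs at h

-- per-direction equality of the two ports' inner computations
theorem pvDir_eq (p d : Int × Int) (nr nc : Int)
    (hd1 : d.1 = -1 ∨ d.1 = 0 ∨ d.1 = 1) (hd2 : d.2 = -1 ∨ d.2 = 0 ∨ d.2 = 1)
    (hd : ¬ (d.1 = 0 ∧ d.2 = 0)) (hnr : 0 ≤ nr) (hnc : 0 ≤ nc) :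
    pvWalk ((nr + nc).toNat + 1) (pvAddWise p d) d nr nc
      = (List.range (pvMinSteps (pvAxisSteps p.1 d.1 nr) (pvAxisSteps p.2 d.2 nc)).toNat).map
          (fun (i : Nat) => (p.1 + ((i : Int) + 1) * d.1, p.2 + ((i : Int) + 1) * d.2)) := by
  have hiff : ∀ c : Int × Int, pvInbounds c nr nc = true ↔
      ((0 ≤ c.1 ∧ c.1 < nr) ∧ (0 ≤ c.2 ∧ c.2 < nc)) := by
    intro c; simp [pvInbounds]
  have hiff' : ∀ c : Int × Int, pvInbounds c nr nc = false ↔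
      ¬ ((0 ≤ c.1 ∧ c.1 < nr) ∧ (0 ≤ c.2 ∧ c.2 < nc)) := by
    intro c; rw [← Bool.not_eq_true, hiff]
  cases ha : pvAxisSteps p.1 d.1 nr with
  | none =>
    cases hb : pvAxisSteps p.2 d.2 nc with
    | none => exact absurd ⟨pvAxisSteps_eq_none_imp _ _ _ ha, pvAxisSteps_eq_none_imp _ _ _ hb⟩ hd
    | some c2 =>
      have hbd := pvAxisSteps_bounds p.2 d.2 nc c2 hnc hb
      have hc : ((pvMinSteps (none : Option Int) (some c2)).toNat : Int) = c2 := by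
        simp [pvMinSteps]; omega
      apply pvWalk_eq_ray
      · intro i hi
        rw [hiff]
        refine ⟨pvAxisSteps_none p.1 d.1 nr i hd1 ha, pvAxisSteps_in p.2 d.2 nc c2 i hd2 hb ?_⟩
        simp [pvMinSteps] at hi; omega
      · rw [hc, hiff']
        intro hcon
        exact pvAxisSteps_fail p.2 d.2 nc c2 hd2 hb hcon.2
      · simp [pvMinSteps]; omega
  | some c1 =>
    have had := pvAxisSteps_bounds p.1 d.1 nr c1 hnr ha
    cases hb : pvAxisSteps p.2 d.2 nc with
    | none =>
      have hc : ((pvMinSteps (some c1) (none : Option Int)).toNat : Int) = c1 := by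
        simp [pvMinSteps]; omega
      apply pvWalk_eq_ray
      · intro i hi
        rw [hiff]
        refine ⟨pvAxisSteps_in p.1 d.1 nr c1 i hd1 ha ?_, pvAxisSteps_none p.2 d.2 nc i hd2 hb⟩
        simp [pvMinSteps] at hi; omega
      · rw [hc, hiff']
        intro hcon
        exact pvAxisSteps_fail p.1 d.1 nr c1 hd1 ha hcon.1
      · simp [pvMinSteps]; omega
    | some c2 =>
      have hbd := pvAxisSteps_bounds p.2 d.2 nc c2 hnc hb
      have hmin : pvMinSteps (some c1) (some c2) = min c1 c2 := rfl
      apply pvWalk_eq_ray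
      · intro i hi
        rw [hmin] at hi
        rw [hiff]
        exact ⟨pvAxisSteps_in p.1 d.1 nr c1 i hd1 ha (by omega),
               pvAxisSteps_in p.2 d.2 nc c2 i hd2 hb (by omega)⟩
      · rw [hmin, hiff']
        intro hcon
        rcases le_total c1 c2 with h | h
        · have hc : (((min c1 c2).toNat : Int)) = c1 := by omega
          rw [hc] at hcon
          exact pvAxisSteps_fail p.1 d.1 nr c1 hd1 ha hcon.1
        · have hc : (((min c1 c2).toNat : Int)) = c2 := by omega
          rw [hc] at hcon
          exact pvAxisSteps_fail p.2 d.2 nc c2 hd2 hb hcon.2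
      · rw [hmin]; omega

-- ===== VERDICT (by name: the statement is the Claim_ definition above) =====
theorem find_reachable_spec : Claim_equal_find_reachable := by
  intro board position _ _
  unfold Spec_find_reachable find_reachable find_reachable_alt pvDirsA
  have hnr : (0 : Int) ≤ (board.length : Int) := Int.natCast_nonneg _
  have hnc : (0 : Int) ≤ ((board.headD []).length : Int) := Int.natCast_nonneg _
  simp only [List.foldl_cons, List.foldl_nil, List.flatMap_cons, List.flatMap_nil,
    List.nil_append, List.append_nil]
  rw [pvDir_eq position (-1,-1) _ _ (by norm_num) (by norm_num) (by norm_num) hnr hnc,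
    pvDir_eq position (-1,0) _ _ (by norm_num) (by norm_num) (by norm_num) hnr hnc,
    pvDir_eq position (-1,1) _ _ (by norm_num) (by norm_num) (by norm_num) hnr hnc,
    pvDir_eq position (0,-1) _ _ (by norm_num) (by norm_num) (by norm_num) hnr hnc,
    pvDir_eq position (0,1) _ _ (by norm_num) (by norm_num) (by norm_num) hnr hnc,
    pvDir_eq position (1,-1) _ _ (by norm_num) (by norm_num) (by norm_num) hnr hnc,
    pvDir_eq position (1,0) _ _ (by norm_num) (by norm_num) (by norm_num) hnr hnc,
    pvDir_eq position (1,1) _ _ (by norm_num) (by norm_num) (by norm_num) hnr hnc]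
  simp [List.append_assoc]
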